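-- pv_equiv track=rewrite | github.com/lucaznch/IST | Discord Bot/Luska.py | get_gametable
-- ===== SOURCE A (Python) =====
-- def get_gametable(gt):
--     table = ''
--     cn = 0
--     for i in range(len(gt)):
--         table += gt[i]
--         cn += 1
--         if cn == 3:
--             cn = 0
--             table += '\n'
--     return table
-- ===== SOURCE B (Python) =====
-- def get_gametable(gt):
--     n = len(gt)
--     parts = []
--     for i in range(0, n, 3):
--         chunk = gt[i:i+3]
--         if i + 3 <= n:
--             chunk += '\n'
--         parts.append(chunk)
--     return ''.join(parts)
-- ===== Notes on version B (the rewrite author's own statement) =====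
-- stated objective: simpler
-- what changed: B walks chunk starts in steps of 3 and joins each 3-slice (plus a newline for full chunks), eliminating A's per-character counter state.
import Mathlib
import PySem

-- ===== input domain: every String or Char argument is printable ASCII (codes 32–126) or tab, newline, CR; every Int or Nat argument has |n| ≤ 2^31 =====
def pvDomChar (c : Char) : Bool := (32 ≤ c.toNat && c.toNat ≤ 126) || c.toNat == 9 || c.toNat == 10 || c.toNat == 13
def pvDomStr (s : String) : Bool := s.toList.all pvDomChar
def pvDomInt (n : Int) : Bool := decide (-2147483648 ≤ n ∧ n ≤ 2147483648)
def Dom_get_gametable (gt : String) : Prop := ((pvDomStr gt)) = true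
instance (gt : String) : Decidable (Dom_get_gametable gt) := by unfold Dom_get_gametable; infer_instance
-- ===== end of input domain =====

-- B groups the string into 3-character chunks (newline after each full chunk) instead of A's per-character counter loop: simpler decomposition, same result.


-- ===== PORT A =====
-- A's loop body: append the character, bump the counter, emit '\n' and reset at 3.
def gtStep (st : List Char × Nat) (ch : Char) : List Char × Nat :=
  let table := st.1 ++ [ch]
  let cn := st.2 + 1
  if cn = 3 then (table ++ ['\n'], 0) else (table, cn)

def get_gametable (gt : String) : String :=
  String.mk (gt.toList.foldl gtStep ([], 0)).1

-- ===== PORT B =====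
-- B's per-chunk pass: take the next 3-slice; a full chunk gets '\n', the final short chunk does not.
def gtChunks : List Char → List Char
  | a :: b :: c :: rest => a :: b :: c :: '\n' :: gtChunks rest
  | xs => xs

def get_gametable_alt (gt : String) : String :=
  String.mk (gtChunks gt.toList)

-- ===== PRECONDITION & SPEC =====
def Spec_get_gametable (gt : String) (out : String) : Prop := out = get_gametable_alt gt
instance (gt : String) (out : String) : Decidable (Spec_get_gametable gt out) := by unfold Spec_get_gametable; infer_instance

-- ===== CLAIM (what is proved, stated in full; the proofs are below) =====
def Claim_equal_get_gametable : Prop := ∀ (gt : String), Dom_get_gametable gt → Spec_get_gametable gt (get_gametable gt)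

-- ===== LEMMAS AND PROOFS =====
theorem gt_fold_eq (cs : List Char) (acc : List Char) :
    (List.foldl gtStep (acc, 0) cs).1 = acc ++ gtChunks cs := by
  match cs with
  | [] => simp [gtChunks]
  | [a] => simp [gtChunks, gtStep]
  | [a, b] => simp [gtChunks, gtStep]
  | a :: b :: c :: rest =>
    have ih := gt_fold_eq rest (acc ++ [a, b, c, '\n'])
    simp only [List.foldl, gtStep] at ih ⊢
    norm_num
    simpa [gtChunks] using ih
termination_by cs.length

-- ===== VERDICT (by name: the statement is the Claim_ definition above) =====
theorem get_gametable_spec : Claim_equal_get_gametable := by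
  intro gt _
  unfold Spec_get_gametable get_gametable get_gametable_alt
  rw [gt_fold_eq gt.toList []]
  simp
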